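-- pv_equiv track=rewrite | github.com/atalyaalon/anyway | accidents_in_roads.py | calc_markers
-- ===== SOURCE A (Python) =====
-- def calc_markers(markers):
--     DEADLY_WEIGHT = 7
--     HARD_WEIGHT = 5
--     LIGHT_WEIGHT = 1
--     severities = [x["severity"] for x in markers]
--     light_count = severities.count(3)
--     hard_count = severities.count(2)
--     deadly_count = severities.count(1)
--
--     return {'grade': deadly_count * DEADLY_WEIGHT + hard_count * HARD_WEIGHT + light_count * LIGHT_WEIGHT,
--             'light': light_count,
--             'hard': hard_count,
--             'deadly': deadly_count
--             }
-- ===== SOURCE B (Python) =====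
-- def calc_markers(markers):
--     severities = sorted(x["severity"] for x in markers)
--
--     def bisect_left(a, v):
--         lo = 0
--         hi = len(a)
--         while lo < hi:
--             mid = (lo + hi) // 2
--             if a[mid] < v:
--                 lo = mid + 1
--             else:
--                 hi = mid
--         return lo
--
--     deadly = bisect_left(severities, 2) - bisect_left(severities, 1)
--     hard = bisect_left(severities, 3) - bisect_left(severities, 2)
--     light = bisect_left(severities, 4) - bisect_left(severities, 3)
--     return {'grade': deadly * 7 + hard * 5 + light,
--             'light': light,
--             'hard': hard,
--             'deadly': deadly
--             }
-- ===== Notes on version B (the rewrite author's own statement) =====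
-- stated objective: alternative
-- what changed: Instead of three linear .count() scans over the severity list, B sorts the severities once and reads each count off as a difference of two hand-written binary-search (bisect_left) positions.
import Mathlib
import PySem

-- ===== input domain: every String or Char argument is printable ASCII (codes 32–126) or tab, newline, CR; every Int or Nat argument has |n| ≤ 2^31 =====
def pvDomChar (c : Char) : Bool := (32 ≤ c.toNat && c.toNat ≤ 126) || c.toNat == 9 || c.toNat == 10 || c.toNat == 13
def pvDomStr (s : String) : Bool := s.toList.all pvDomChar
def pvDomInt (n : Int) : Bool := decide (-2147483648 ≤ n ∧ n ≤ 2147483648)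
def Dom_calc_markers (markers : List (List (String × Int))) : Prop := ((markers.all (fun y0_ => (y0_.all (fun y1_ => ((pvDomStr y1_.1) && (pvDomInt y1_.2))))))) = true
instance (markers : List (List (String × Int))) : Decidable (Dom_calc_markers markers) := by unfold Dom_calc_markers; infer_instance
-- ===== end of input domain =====

-- B replaces A's three linear .count() scans by one sort plus hand-written binary searches,
-- reading each count as a difference of two bisect_left positions (objective: alternative).

-- ===== PORT A =====
-- x["severity"]: first-match lookup in the association list; the .getD 0 default is
-- unreachable under Pre_calc_markers (Python raises KeyError there).
def pySev (m : List (String × Int)) : Int := (List.lookup "severity" m).getD 0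

def calc_markers (markers : List (List (String × Int))) : List (String × Int) :=
  let severities := markers.map pySev
  let light_count := PySem.List.count severities 3
  let hard_count := PySem.List.count severities 2
  let deadly_count := PySem.List.count severities 1
  [("grade", deadly_count * 7 + hard_count * 5 + light_count * 1),
   ("light", light_count), ("hard", hard_count), ("deadly", deadly_count)]

-- ===== PORT B =====
-- the hand-written bisect_left while-loop of Source B; (lo+hi)//2 on nonnegative ints is Nat
-- division, and a[mid] is in range (mid < hi ≤ len), so the .getD 0 default is unreachable.
def blLoop (a : List Int) (v : Int) (lo hi : Nat) : Nat :=
  if lo < hi then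
    let mid := (lo + hi) / 2
    if (PySem.List.pyGet? a (mid : Int)).getD 0 < v then blLoop a v (mid + 1) hi
    else blLoop a v lo mid
  else lo
termination_by hi - lo
decreasing_by all_goals omega

def bisectLeftB (a : List Int) (v : Int) : Nat := blLoop a v 0 a.length

def calc_markers_alt (markers : List (List (String × Int))) : List (String × Int) :=
  let severities := PySem.List.sorted
    (markers.map (fun x => (List.lookup "severity" x).getD 0)) (fun s => s) false
  let deadly : Int := (bisectLeftB severities 2 : Int) - (bisectLeftB severities 1 : Int)
  let hard : Int := (bisectLeftB severities 3 : Int) - (bisectLeftB severities 2 : Int)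
  let light : Int := (bisectLeftB severities 4 : Int) - (bisectLeftB severities 3 : Int)
  [("grade", deadly * 7 + hard * 5 + light),
   ("light", light), ("hard", hard), ("deadly", deadly)]

-- ===== PRECONDITION & SPEC =====
-- Pre_ excludes exactly the markers missing the "severity" key, on which Python A raises KeyError.
def Pre_calc_markers (markers : List (List (String × Int))) : Prop :=
  (markers.all (fun m => m.any (fun kv => kv.1 == "severity"))) = true
instance (markers : List (List (String × Int))) : Decidable (Pre_calc_markers markers) := by unfold Pre_calc_markers; infer_instance
def pvWitness_calc_markers : (List (List (String × Int))) := [[("severity", 1)], [("severity", 3), ("x", 0)]]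

def Spec_calc_markers (markers : List (List (String × Int))) (out : List (String × Int)) : Prop := out = calc_markers_alt markers
instance (markers : List (List (String × Int))) (out : List (String × Int)) : Decidable (Spec_calc_markers markers out) := by unfold Spec_calc_markers; infer_instance

-- ===== CLAIM (what is proved, stated in full; the proofs are below) =====
def Claim_equal_calc_markers : Prop := ∀ (markers : List (List (String × Int))), Dom_calc_markers markers → Pre_calc_markers markers → Spec_calc_markers markers (calc_markers markers)

-- ===== LEMMAS AND PROOFS =====

-- binary-search invariant: on a ≤-sorted list, blLoop returns the number of elements < v
lemma blLoop_eq (a : List Int) (v : Int) (hs : a.Pairwise (· ≤ ·)) :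
    ∀ lo hi, hi ≤ a.length → lo ≤ hi →
    (∀ j (hj : j < a.length), j < lo → a[j] < v) →
    (∀ j (hj : j < a.length), hi ≤ j → v ≤ a[j]) →
    blLoop a v lo hi = a.countP (fun x => decide (x < v)) := by
  intro lo hi
  induction hn : hi - lo using Nat.strong_induction_on generalizing lo hi with
  | _ n ih =>
    intro hhi hle hbelow habove
    rw [blLoop]
    by_cases hlt : lo < hi
    · simp only [hlt, if_true]
      have hmid : (lo + hi) / 2 < hi := by omega
      have hmidlo : lo ≤ (lo + hi) / 2 := by omega
      have hmlen : (lo + hi) / 2 < a.length := by omega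
      have hget : (PySem.List.pyGet? a ((lo + hi) / 2 : Nat)).getD 0 = a[(lo + hi) / 2] := by
        rw [PySem.List.pyGet?_natCast, List.getElem?_eq_getElem hmlen]; rfl
      have hmono : ∀ i j (hi' : i < a.length) (hj' : j < a.length), i ≤ j → a[i] ≤ a[j] := by
        intro i j hi' hj' hij
        rcases Nat.lt_or_ge i j with h | h
        · exact (List.pairwise_iff_getElem.mp hs) i j hi' hj' h
        · have : i = j := by omega
          subst this; exact le_refl _
      by_cases hcmp : a[(lo + hi) / 2] < v
      · simp only [hget, hcmp, if_true]
        exact ih (hi - ((lo + hi) / 2 + 1)) (by omega) _ _ rfl hhi (by omega)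
          (fun j hj hjlt => lt_of_le_of_lt (hmono j _ hj hmlen (by omega)) hcmp)
          habove
      · simp only [hget, hcmp, if_false]
        exact ih ((lo + hi) / 2 - lo) (by omega) _ _ rfl (by omega) (by omega)
          hbelow
          (fun j hj hjge => le_trans (not_lt.mp hcmp) (hmono _ j hmlen hj hjge))
    · simp only [hlt, if_false]
      have heq : lo = hi := by omega
      subst heq
      rw [← List.take_append_drop lo a, List.countP_append]
      have h1 : (a.take lo).countP (fun x => decide (x < v)) = lo := by
        have hall : ∀ x ∈ a.take lo, (fun x => decide (x < v)) x = true := by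
          intro x hx
          obtain ⟨j, hj, hjx⟩ := List.mem_iff_getElem.mp hx
          have hjlt : j < lo := by simp [List.length_take] at hj; omega
          have hj' : j < a.length := by omega
          have hx' : a[j] = x := by rw [← hjx]; simp [List.getElem_take]
          simpa [← hx'] using hbelow j hj' hjlt
        rw [List.countP_eq_length.mpr hall]
        simp [List.length_take]
        omega
      have h2 : (a.drop lo).countP (fun x => decide (x < v)) = 0 := by
        rw [List.countP_eq_zero]
        intro x hx
        obtain ⟨j, hj, hjx⟩ := List.mem_iff_getElem.mp hx
        have hj' : lo + j < a.length := by simp [List.length_drop] at hj; omega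
        have hx' : a[lo + j] = x := by rw [← hjx]; simp [List.getElem_drop]
        simp only [← hx', decide_eq_true_eq, not_lt]
        exact habove _ hj' (by omega)
      omega

lemma bisectLeftB_eq (a : List Int) (v : Int) (hs : a.Pairwise (· ≤ ·)) :
    bisectLeftB a v = a.countP (fun x => decide (x < v)) :=
  blLoop_eq a v hs 0 a.length (le_refl _) (Nat.zero_le _)
    (fun j _ h => absurd h (Nat.not_lt_zero j))
    (fun j hj h => absurd hj (by omega))

-- a count is a difference of two strict-threshold counts (over any Int list)
lemma countP_lt_succ (xs : List Int) (v : Int) :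
    xs.countP (fun x => decide (x < v + 1)) = xs.countP (fun x => decide (x ≤ v)) :=
  List.countP_congr (fun x _ => by have h : x < v + 1 ↔ x ≤ v := by omega
                                   simp [h])

lemma count_sub (xs : List Int) (v : Int) :
    (xs.countP (fun x => decide (x < v + 1)) : Int) - (xs.countP (fun x => decide (x < v)) : Int)
      = (xs.count v : Int) := by
  rw [countP_lt_succ]
  induction xs with
  | nil => simp
  | cons x t ih =>
    simp only [List.countP_cons, List.count_cons]
    rcases lt_trichotomy x v with h | h | h
    · simp [le_of_lt h, h, Int.ne_of_lt h]; push_cast at *; omega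
    · subst h; simp; omega
    · simp [not_le.mpr h, not_lt.mpr (le_of_lt h), Int.ne_of_gt h]; push_cast at *; omega

-- ===== VERDICT (by name: the statement is the Claim_ definition above) =====
theorem calc_markers_spec : Claim_equal_calc_markers := by
  intro markers _ _
  unfold Spec_calc_markers calc_markers calc_markers_alt
  simp only []
  have hmap : markers.map (fun x => (List.lookup "severity" x).getD 0) = markers.map pySev := rfl
  rw [hmap]
  set xs := markers.map pySev with hxs
  set s := PySem.List.sorted xs (fun s => s) false with hsdef
  have hperm : s.Perm xs := PySem.List.sorted_perm xs (fun s => s) false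
  have hs : s.Pairwise (· ≤ ·) := PySem.List.sorted_pairwise xs (fun s => s)
  have hcnt : ∀ v : Int, (bisectLeftB s (v + 1) : Int) - (bisectLeftB s v : Int) = (xs.count v : Int) := by
    intro v
    rw [bisectLeftB_eq s _ hs, bisectLeftB_eq s v hs, count_sub s v, hperm.count_eq]
  have h1 := hcnt 1
  have h2 := hcnt 2
  have h3 := hcnt 3
  norm_num at h1 h2 h3
  simp only [PySem.List.count_eq]
  rw [h1, h2, h3]
  ring_nf
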